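-- pv_equiv track=rewrite | github.com/randomparity/vpo | src/video_policy_orchestrator/executor/transcode.py | _codec_matches_any
-- ===== SOURCE A (Python) =====
-- CODEC_ALIASES: dict[str, tuple[str, ...]] = {
--     "hevc": ("hevc", "h265", "x265"),
--     "h265": ("hevc", "h265", "x265"),
--     "h264": ("h264", "avc", "x264"),
--     "avc": ("h264", "avc", "x264"),
--     "vp9": ("vp9", "vp09"),
--     "av1": ("av1", "av01", "libaom-av1"),
-- }
--
-- def _codec_matches_any(
--     current_codec: str | None, codec_patterns: tuple[str, ...] | None
-- ) -> bool:
--     """Check if current codec matches any pattern.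
--
--     Args:
--         current_codec: Current video codec (from ffprobe).
--         codec_patterns: Tuple of codec patterns to match.
--
--     Returns:
--         True if codec matches any pattern.
--     """
--     if codec_patterns is None:
--         return True  # No patterns = always passes
--     if current_codec is None:
--         return False
--
--     current_lower = current_codec.lower()
--
--     for pattern in codec_patterns:
--         pattern_lower = pattern.lower()
--
--         # Direct match
--         if current_lower == pattern_lower:
--             return True
--
--         # Check if pattern has aliases - use exact matching
--         aliases = CODEC_ALIASES.get(pattern_lower, ())
--         if current_lower in aliases:
--             return True
--
--         # Check if current codec has aliases that match pattern exactly
--         current_aliases = CODEC_ALIASES.get(current_lower, ())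
--         if pattern_lower in current_aliases:
--             return True
--
--     return False
-- ===== SOURCE B (Python) =====
-- CODEC_ALIASES: dict[str, tuple[str, ...]] = {
--     "hevc": ("hevc", "h265", "x265"),
--     "h265": ("hevc", "h265", "x265"),
--     "h264": ("h264", "avc", "x264"),
--     "avc": ("h264", "avc", "x264"),
--     "vp9": ("vp9", "vp09"),
--     "av1": ("av1", "av01", "libaom-av1"),
-- }
--
--
-- def _codec_matches_any(current_codec, codec_patterns):
--     """Build the full equivalence set of the current codec once, then test
--     each pattern by a single set membership."""
--     if codec_patterns is None:
--         return True
--     if current_codec is None: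
--         return False
--     cl = current_codec.lower()
--     matches = {cl}
--     matches.update(CODEC_ALIASES.get(cl, ()))
--     matches.update(k for k, v in CODEC_ALIASES.items() if cl in v)
--     return any(p.lower() in matches for p in codec_patterns)
-- ===== Notes on version B (the rewrite author's own statement) =====
-- stated objective: alternative
-- what changed: Instead of A's three bidirectional checks per pattern (direct equality, current-in-aliases(pattern), pattern-in-aliases(current)), B precomputes once the full equivalence set of the current codec ({current} + its aliases + every alias-table key whose alias tuple contains it) and answers each pattern with a single set membership.
import Mathlib
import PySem

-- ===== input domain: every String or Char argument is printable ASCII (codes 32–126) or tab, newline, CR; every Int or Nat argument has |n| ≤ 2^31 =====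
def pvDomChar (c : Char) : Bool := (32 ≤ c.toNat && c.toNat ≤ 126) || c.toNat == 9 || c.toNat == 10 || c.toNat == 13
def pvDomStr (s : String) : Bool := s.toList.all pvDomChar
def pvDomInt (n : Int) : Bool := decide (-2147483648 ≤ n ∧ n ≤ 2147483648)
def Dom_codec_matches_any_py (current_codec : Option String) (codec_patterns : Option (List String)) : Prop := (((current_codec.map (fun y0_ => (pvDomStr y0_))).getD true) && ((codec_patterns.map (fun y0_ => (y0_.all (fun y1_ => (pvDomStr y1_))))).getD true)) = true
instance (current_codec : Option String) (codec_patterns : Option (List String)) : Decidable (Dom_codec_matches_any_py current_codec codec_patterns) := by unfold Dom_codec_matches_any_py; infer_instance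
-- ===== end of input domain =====

-- B builds the current codec's whole equivalence set once and tests each pattern by one set
-- membership, instead of A's three checks (direct, pattern-aliases, current-aliases) per pattern.

def CODEC_ALIASES : PySem.Dict String (List String) := PySem.Dict.mk
  [ ("hevc", ["hevc", "h265", "x265"])
  , ("h265", ["hevc", "h265", "x265"])
  , ("h264", ["h264", "avc", "x264"])
  , ("avc",  ["h264", "avc", "x264"])
  , ("vp9",  ["vp9", "vp09"])
  , ("av1",  ["av1", "av01", "libaom-av1"]) ]

-- ===== PORT A =====
-- the 'for pattern in codec_patterns' loop with its early returns
def codecLoopA (current_lower : String) : List String → Bool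
  | [] => false
  | pattern :: rest =>
    let pattern_lower := PySem.Str.lower pattern
    if current_lower == pattern_lower then true
    else if (CODEC_ALIASES.getD pattern_lower []).contains current_lower then true
    else if (CODEC_ALIASES.getD current_lower []).contains pattern_lower then true
    else codecLoopA current_lower rest

def codec_matches_any_py (current_codec : Option String) (codec_patterns : Option (List String)) : Bool :=
  match codec_patterns with
  | none => true
  | some pats =>
    match current_codec with
    | none => false
    | some cur =>
      let current_lower := PySem.Str.lower cur
      codecLoopA current_lower pats

-- ===== PORT B =====
-- matches = {cl}; matches.update(CODEC_ALIASES.get(cl, ())); matches.update(k for k, v in CODEC_ALIASES.items() if cl in v)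
def codecMatchSet (cl : String) : PySem.Set String :=
  PySem.Set.update
    (PySem.Set.update (PySem.Set.ofList [cl]) (CODEC_ALIASES.getD cl []))
    ((CODEC_ALIASES.items.filter (fun kv => kv.2.contains cl)).map (·.1))

def codec_matches_any_py_alt (current_codec : Option String) (codec_patterns : Option (List String)) : Bool :=
  match codec_patterns with
  | none => true
  | some pats =>
    match current_codec with
    | none => false
    | some cur =>
      let cl := PySem.Str.lower cur
      let mset := codecMatchSet cl
      pats.any (fun p => PySem.Set.contains mset (PySem.Str.lower p))

-- ===== PRECONDITION & SPEC =====
def Spec_codec_matches_any_py (current_codec : Option String) (codec_patterns : Option (List String)) (out : Bool) : Prop := out = codec_matches_any_py_alt current_codec codec_patterns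
instance (current_codec : Option String) (codec_patterns : Option (List String)) (out : Bool) : Decidable (Spec_codec_matches_any_py current_codec codec_patterns out) := by unfold Spec_codec_matches_any_py; infer_instance

-- ===== CLAIM (what is proved, stated in full; the proofs are below) =====
def Claim_equal_codec_matches_any_py : Prop := ∀ (current_codec : Option String) (codec_patterns : Option (List String)), Dom_codec_matches_any_py current_codec codec_patterns → Spec_codec_matches_any_py current_codec codec_patterns (codec_matches_any_py current_codec codec_patterns)

-- ===== LEMMAS AND PROOFS =====

-- 'cl is an alias of pl' ↔ 'pl is a key of the alias table whose alias list contains cl'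
lemma aliasKey (cl pl : String) :
    cl ∈ CODEC_ALIASES.getD pl [] ↔
      ∃ kv ∈ CODEC_ALIASES.items.filter (fun kv => kv.2.contains cl), kv.1 = pl := by
  by_cases h1 : "hevc" = pl <;> by_cases h2 : "h265" = pl <;> by_cases h3 : "h264" = pl <;>
    by_cases h4 : "avc" = pl <;> by_cases h5 : "vp9" = pl <;> by_cases h6 : "av1" = pl <;>
    subst_vars <;>
    simp_all [CODEC_ALIASES, PySem.Dict.getD_eq_get?_getD, PySem.Dict.get?_mk_cons,
      List.mem_filter] <;> simp_all [PySem.Dict.get?, eq_comm]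

-- one pattern: A's three checks equal B's single membership test
lemma perPattern (cl pl : String) :
    ((cl == pl) || (CODEC_ALIASES.getD pl []).contains cl || (CODEC_ALIASES.getD cl []).contains pl)
      = PySem.Set.contains (codecMatchSet cl) pl := by
  rw [Bool.eq_iff_iff]
  simp only [Bool.or_eq_true, beq_iff_eq, List.contains_iff_mem,
    PySem.Set.contains_iff, codecMatchSet, PySem.Set.mem_update, PySem.Set.mem_ofList,
    List.mem_singleton, List.mem_map, aliasKey cl pl]
  constructor
  · rintro ((h | h) | h)
    · exact Or.inl (Or.inl h.symm)
    · exact Or.inr h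
    · exact Or.inl (Or.inr h)
  · rintro ((h | h) | h)
    · exact Or.inl (Or.inl h.symm)
    · exact Or.inr h
    · exact Or.inl (Or.inr h)

-- A's early-return loop is B's 'any' over the match set
lemma loopA_eq_any (cl : String) (pats : List String) :
    codecLoopA cl pats = pats.any (fun p => PySem.Set.contains (codecMatchSet cl) (PySem.Str.lower p)) := by
  induction pats with
  | nil => rfl
  | cons p rest ih =>
    simp only [codecLoopA, List.any_cons, ← perPattern cl (PySem.Str.lower p), ← ih]
    by_cases h1 : cl == PySem.Str.lower p <;>
      by_cases h2 : (CODEC_ALIASES.getD (PySem.Str.lower p) []).contains cl <;>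
      by_cases h3 : (CODEC_ALIASES.getD cl []).contains (PySem.Str.lower p) <;>
      simp_all

-- ===== VERDICT (by name: the statement is the Claim_ definition above) =====
theorem codec_matches_any_py_spec : Claim_equal_codec_matches_any_py := by
  intro cc cp _
  unfold Spec_codec_matches_any_py codec_matches_any_py codec_matches_any_py_alt
  cases cp with
  | none => rfl
  | some pats =>
    cases cc with
    | none => rfl
    | some cur => exact loopA_eq_any _ _
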